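-- pv_equiv track=rewrite | github.com/fbreuer/partition-analysis-data | instances/scripts/birkhoff.py | thematrix
-- ===== SOURCE A (Python) =====
-- def thematrix(n):
-- 	matrix = []
-- 	for i in range(n):
-- 		row = [0 for k in range(n**2)]
-- 		for j in range(n):
-- 			row[i+n*j] = 1
-- 		matrix.append(row)
-- 	for j in range(n):
-- 		row = [0 for k in range(n**2)]
-- 		for i in range(n):
-- 			row[i+n*j] = 1
-- 		matrix.append(row)
-- 	return matrix
-- ===== SOURCE B (Python) =====
-- def thematrix(n):
-- 	I = [[int(a == b) for b in range(n)] for a in range(n)]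
-- 	cols = [I[i] + I[j] for j in range(n) for i in range(n)]
-- 	return [[col[r] for col in cols] for r in range(2 * n)]
-- ===== Notes on version B (the rewrite author's own statement) =====
-- stated objective: alternative
-- what changed: B builds the matrix column-major instead of row-major: it constructs the n-by-n identity once, assembles each of the n^2 columns as the concatenation of two identity rows I[i]+I[j] (the column of variable x_ij), and obtains the result by transposing the column list; A instead allocates zero rows and scatters n ones into each.
import Mathlib
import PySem

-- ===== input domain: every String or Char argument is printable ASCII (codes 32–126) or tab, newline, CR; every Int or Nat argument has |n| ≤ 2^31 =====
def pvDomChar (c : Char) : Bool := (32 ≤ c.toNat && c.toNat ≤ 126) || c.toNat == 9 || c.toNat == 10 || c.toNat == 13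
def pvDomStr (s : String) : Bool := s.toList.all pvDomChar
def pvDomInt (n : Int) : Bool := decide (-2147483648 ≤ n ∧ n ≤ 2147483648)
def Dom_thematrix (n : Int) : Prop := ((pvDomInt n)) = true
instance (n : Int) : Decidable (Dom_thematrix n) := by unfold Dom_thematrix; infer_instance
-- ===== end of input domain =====

-- B builds the matrix column-major (identity once, each column = I[i]+I[j], then transpose) instead of A's zero-row-then-scatter row construction (alternative decomposition, same cost).

-- ===== PORT A =====
-- literal port of A: zero row, then n scattered writes row[i+n*j] = 1, appended row by row
def thematrix (n : Int) : List (List Int) :=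
  let matrix : List (List Int) := []
  let matrix := (PySem.List.pyRange 0 n 1).foldl (fun matrix i =>
    let row : List Int := (PySem.List.pyRange 0 (n ^ 2) 1).map (fun _ => 0)
    let row := (PySem.List.pyRange 0 n 1).foldl (fun row j =>
      PySem.List.pySetD row (i + n * j) 1) row
    matrix ++ [row]) matrix
  let matrix := (PySem.List.pyRange 0 n 1).foldl (fun matrix j =>
    let row : List Int := (PySem.List.pyRange 0 (n ^ 2) 1).map (fun _ => 0)
    let row := (PySem.List.pyRange 0 n 1).foldl (fun row i =>
      PySem.List.pySetD row (i + n * j) 1) row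
    matrix ++ [row]) matrix
  matrix

-- ===== PORT B =====
-- port of B: identity matrix I; column for cell (i,j) is I[i] ++ I[j]; result = explicit transpose of the column list.
-- The indexings I[i], I[j], col[r] are always in range in B, so pyGetD with a default is exact here.
def thematrix_alt (n : Int) : List (List Int) :=
  let I : List (List Int) := (PySem.List.pyRange 0 n 1).map (fun a =>
    (PySem.List.pyRange 0 n 1).map (fun b => if a = b then (1 : Int) else 0))
  let cols : List (List Int) := (PySem.List.pyRange 0 n 1).flatMap (fun j =>
    (PySem.List.pyRange 0 n 1).map (fun i =>
      PySem.List.pyGetD I i [] ++ PySem.List.pyGetD I j []))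
  (PySem.List.pyRange 0 (2 * n) 1).map (fun r =>
    cols.map (fun col => PySem.List.pyGetD col r (0 : Int)))

-- ===== PRECONDITION & SPEC =====
def Spec_thematrix (n : Int) (out : List (List Int)) : Prop := out = thematrix_alt n
instance (n : Int) (out : List (List Int)) : Decidable (Spec_thematrix n out) := by unfold Spec_thematrix; infer_instance

-- ===== CLAIM (what is proved, stated in full; the proofs are below) =====
def Claim_equal_thematrix : Prop := ∀ (n : Int), Dom_thematrix n → Spec_thematrix n (thematrix n)

-- ===== LEMMAS AND PROOFS =====

-- closed-form middle point both ports are proved equal to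
def pvE (n i : Int) : List Int :=
  (PySem.List.pyRange 0 n 1).map (fun b => if i = b then (1 : Int) else 0)

def pvMtop (n : Int) : List (List Int) :=
  (PySem.List.pyRange 0 n 1).map (fun i =>
    (PySem.List.pyRange 0 (n * n) 1).map (fun c => if c % n = i then (1 : Int) else 0))

def pvMbot (n : Int) : List (List Int) :=
  (PySem.List.pyRange 0 n 1).map (fun j =>
    (PySem.List.pyRange 0 (n * n) 1).map (fun c => if c / n = j then (1 : Int) else 0))

theorem scatter_mod (n i : Int) (hn : 0 < n) (hi0 : 0 ≤ i) (hin : i < n) :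
    ∀ t : Nat, (t : Int) ≤ n →
    (PySem.List.pyRange 0 (t : Int) 1).foldl (fun row j => PySem.List.pySetD row (i + n * j) 1)
        ((PySem.List.pyRange 0 (n ^ 2) 1).map (fun _ => (0 : Int)))
    = (PySem.List.pyRange 0 (n * n) 1).map (fun c => if c % n = i ∧ c / n < (t : Int) then (1 : Int) else 0) := by
  have hn0 : n ≠ 0 := hn.ne'
  intro t
  induction t with
  | zero =>
    intro _
    rw [show ((0:Nat):Int) = 0 by norm_num, PySem.List.pyRange_one_eq_nil le_rfl]
    simp only [List.foldl_nil, pow_two]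
    refine (List.map_congr_left ?_).symm
    intro c hc
    rw [PySem.List.mem_pyRange_one] at hc
    have : ¬ (c % n = i ∧ c / n < 0) := by
      rintro ⟨-, h2⟩
      have := Int.ediv_nonneg hc.1 hn.le
      omega
    simp [this]
  | succ t ih =>
    intro ht
    have ht' : (t : Int) ≤ n := by push_cast at ht ⊢; omega
    have hcast : ((t + 1 : Nat) : Int) = (t : Int) + 1 := by push_cast; ring
    rw [hcast, PySem.List.pyRange_one_succ_right (by positivity), List.foldl_append, ih ht']
    simp only [List.foldl_cons, List.foldl_nil]
    have hpos : (0:Int) ≤ i + n * (t:Int) := by positivity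
    rw [PySem.List.pySetD_of_nonneg _ _ hpos]
    apply List.ext_getElem
    · simp
    · intro k hk1 hk2
      simp only [List.getElem_set, List.getElem_map, PySem.List.getElem_pyRange_one, zero_add]
      have hklen : (k : Int) < n * n := by
        simp [PySem.List.length_pyRange_one] at hk2
        omega
      have hmod : (i + n * (t:Int)) % n = i := by
        rw [Int.add_mul_emod_self_left]; exact Int.emod_eq_of_lt hi0 hin
      have hdiv : (i + n * (t:Int)) / n = (t:Int) := by
        rw [Int.add_mul_ediv_left _ _ hn0, Int.ediv_eq_zero_of_lt hi0 hin, zero_add]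
      have hsplit : (k : Int) = n * ((k:Int) / n) + (k:Int) % n := (Int.ediv_add_emod _ _).symm
      have hkey : ((i + n * (t:Int)).toNat = k) ↔ ((k:Int) = i + n * (t:Int)) := by
        have : 0 ≤ i + n * (t:Int) := by positivity
        omega
      by_cases hk : (k:Int) = i + n * (t:Int)
      · rw [if_pos (hkey.mpr hk), hk, if_pos ⟨hmod, by rw [hdiv]; omega⟩]
      · rw [if_neg (fun h => hk (hkey.mp h))]
        by_cases hm : (k:Int) % n = i
        · have hd : (k:Int) / n ≠ (t:Int) := fun h => hk (by rw [hsplit, hm, h]; ring)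
          by_cases hlt : (k:Int) / n < (t:Int)
          · rw [if_pos ⟨hm, hlt⟩, if_pos ⟨hm, by omega⟩]
          · rw [if_neg (fun h => hlt h.2), if_neg (fun h => by omega)]
        · rw [if_neg (fun h => hm h.1), if_neg (fun h => hm h.1)]

theorem scatter_div (n j : Int) (hn : 0 < n) (hj0 : 0 ≤ j) (hjn : j < n) :
    ∀ t : Nat, (t : Int) ≤ n →
    (PySem.List.pyRange 0 (t : Int) 1).foldl (fun row i => PySem.List.pySetD row (i + n * j) 1)
        ((PySem.List.pyRange 0 (n ^ 2) 1).map (fun _ => (0 : Int)))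
    = (PySem.List.pyRange 0 (n * n) 1).map (fun c => if c / n = j ∧ c % n < (t : Int) then (1 : Int) else 0) := by
  have hn0 : n ≠ 0 := hn.ne'
  intro t
  induction t with
  | zero =>
    intro _
    rw [show ((0:Nat):Int) = 0 by norm_num, PySem.List.pyRange_one_eq_nil le_rfl]
    simp only [List.foldl_nil, pow_two]
    refine (List.map_congr_left ?_).symm
    intro c hc
    rw [PySem.List.mem_pyRange_one] at hc
    have : ¬ (c / n = j ∧ c % n < 0) := by
      rintro ⟨-, h2⟩
      have := Int.emod_nonneg c hn0
      omega
    simp [this]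
  | succ t ih =>
    intro ht
    have ht' : (t : Int) ≤ n := by push_cast at ht ⊢; omega
    have hcast : ((t + 1 : Nat) : Int) = (t : Int) + 1 := by push_cast; ring
    rw [hcast, PySem.List.pyRange_one_succ_right (by positivity), List.foldl_append, ih ht']
    simp only [List.foldl_cons, List.foldl_nil]
    have hpos : (0:Int) ≤ (t:Int) + n * j := by positivity
    rw [PySem.List.pySetD_of_nonneg _ _ hpos]
    apply List.ext_getElem
    · simp
    · intro k hk1 hk2
      simp only [List.getElem_set, List.getElem_map, PySem.List.getElem_pyRange_one, zero_add]
      have hklen : (k : Int) < n * n := by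
        simp [PySem.List.length_pyRange_one] at hk2
        omega
      have htn : (t:Int) < n := by omega
      have ht0 : (0:Int) ≤ (t:Int) := by positivity
      have hmod : ((t:Int) + n * j) % n = (t:Int) := by
        rw [Int.add_mul_emod_self_left]; exact Int.emod_eq_of_lt ht0 htn
      have hdiv : ((t:Int) + n * j) / n = j := by
        rw [Int.add_mul_ediv_left _ _ hn0, Int.ediv_eq_zero_of_lt ht0 htn, zero_add]
      have hsplit : (k : Int) = n * ((k:Int) / n) + (k:Int) % n := (Int.ediv_add_emod _ _).symm
      have hkey : (((t:Int) + n * j).toNat = k) ↔ ((k:Int) = (t:Int) + n * j) := by omega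
      by_cases hk : (k:Int) = (t:Int) + n * j
      · rw [if_pos (hkey.mpr hk), hk, if_pos ⟨hdiv, by rw [hmod]; omega⟩]
      · rw [if_neg (fun h => hk (hkey.mp h))]
        by_cases hd : (k:Int) / n = j
        · have hm : (k:Int) % n ≠ (t:Int) := fun h => hk (by rw [hsplit, hd, h]; ring)
          by_cases hlt : (k:Int) % n < (t:Int)
          · rw [if_pos ⟨hd, hlt⟩, if_pos ⟨hd, by omega⟩]
          · rw [if_neg (fun h => hlt h.2), if_neg (fun h => by omega)]
        · rw [if_neg (fun h => hd h.1), if_neg (fun h => hd h.1)]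

theorem foldl_append_map {α β : Type} (xs : List α) (f : α → List β) (init : List (List β)) :
    xs.foldl (fun acc x => acc ++ [f x]) init = init ++ xs.map f := by
  induction xs generalizing init with
  | nil => simp
  | cons x xs ih => simp [ih]

-- A equals the closed-form block matrix
theorem a_eq_blocks (n : Int) : thematrix n = pvMtop n ++ pvMbot n := by
  by_cases hn : n ≤ 0
  · simp [thematrix, pvMtop, pvMbot, PySem.List.pyRange_one_eq_nil hn]
  · push_neg at hn
    have hnt : ((n.toNat : Nat) : Int) = n := Int.toNat_of_nonneg hn.le
    unfold thematrix pvMtop pvMbot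
    simp only [foldl_append_map, List.nil_append]
    congr 1
    · apply List.map_congr_left
      intro i hi
      rw [PySem.List.mem_pyRange_one] at hi
      rw [show PySem.List.pyRange 0 n 1 = PySem.List.pyRange 0 ((n.toNat : Nat) : Int) 1 by rw [hnt]]
      rw [scatter_mod n i hn hi.1 hi.2 n.toNat (by omega)]
      apply List.map_congr_left
      intro c hc
      rw [PySem.List.mem_pyRange_one] at hc
      have hdl : c / n < n := by
        rw [Int.ediv_lt_iff_lt_mul hn]; exact hc.2
      rw [hnt]
      by_cases hm : c % n = i
      · rw [if_pos ⟨hm, hdl⟩, if_pos hm]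
      · rw [if_neg (fun h => hm h.1), if_neg hm]
    · apply List.map_congr_left
      intro j hj
      rw [PySem.List.mem_pyRange_one] at hj
      rw [show PySem.List.pyRange 0 n 1 = PySem.List.pyRange 0 ((n.toNat : Nat) : Int) 1 by rw [hnt]]
      rw [scatter_div n j hn hj.1 hj.2 n.toNat (by omega)]
      apply List.map_congr_left
      intro c hc
      rw [PySem.List.mem_pyRange_one] at hc
      have hml : c % n < n := Int.emod_lt_of_pos _ hn
      rw [hnt]
      by_cases hd : c / n = j
      · rw [if_pos ⟨hd, hml⟩, if_pos hd]
      · rw [if_neg (fun h => hd h.1), if_neg hd]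

theorem flatMap_congr_mem {α β : Type} {l : List α} {f g : α → List β}
    (h : ∀ x ∈ l, f x = g x) : l.flatMap f = l.flatMap g := by
  induction l with
  | nil => rfl
  | cons x xs ih =>
    simp only [List.flatMap_cons, h x (List.mem_cons_self), ih (fun y hy => h y (List.mem_cons_of_mem _ hy))]

-- double comprehension over two ranges = single map over the product range, i fast, j slow
theorem flatMap_prod_range (n : Int) (hn : 0 ≤ n) (g : Int → Int → List Int) :
    ∀ m : Nat,
    (PySem.List.pyRange 0 (m : Int) 1).flatMap (fun j => (PySem.List.pyRange 0 n 1).map (fun i => g j i))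
    = (PySem.List.pyRange 0 (n * m) 1).map (fun c => g (c / n) (c % n)) := by
  intro m
  induction m with
  | zero =>
    rw [show ((0:Nat):Int) = 0 by norm_num, PySem.List.pyRange_one_eq_nil le_rfl,
        show n * (0:Int) = 0 by ring, PySem.List.pyRange_one_eq_nil le_rfl]
    rfl
  | succ m ih =>
    have hcast : ((m + 1 : Nat) : Int) = (m : Int) + 1 := by push_cast; ring
    have hm0 : (0:Int) ≤ (m:Int) := by positivity
    rw [hcast, PySem.List.pyRange_one_succ_right hm0, List.flatMap_append, ih]
    have hsplit : PySem.List.pyRange 0 (n * ((m:Int) + 1)) 1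
        = PySem.List.pyRange 0 (n * (m:Int)) 1 ++ PySem.List.pyRange (n * (m:Int)) (n * ((m:Int) + 1)) 1 :=
      PySem.List.pyRange_one_append 0 (n * (m:Int)) (n * ((m:Int)+1)) (by positivity) (by nlinarith)
    rw [hsplit, List.map_append]
    congr 1
    simp only [List.flatMap_cons, List.flatMap_nil, List.append_nil]
    have hrg : n * ((m:Int) + 1) - n * (m:Int) = n := by ring
    apply List.ext_getElem
    · simp [PySem.List.length_pyRange_one, hrg]
    · intro k hk1 hk2
      simp only [List.getElem_map, PySem.List.getElem_pyRange_one, zero_add]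
      have hkn : (k : Int) < n := by
        simp [PySem.List.length_pyRange_one, hrg] at hk1; omega
      have hnpos : (0:Int) < n := by omega
      have hdiv : (n * (m:Int) + (k:Int)) / n = (m:Int) := by
        rw [add_comm, Int.add_mul_ediv_left _ _ hnpos.ne',
            Int.ediv_eq_zero_of_lt (by positivity) hkn, zero_add]
      have hmod : (n * (m:Int) + (k:Int)) % n = (k:Int) := by
        rw [add_comm, Int.add_mul_emod_self_left]
        exact Int.emod_eq_of_lt (by positivity) hkn
      rw [hdiv, hmod]

theorem length_pvE (n i : Int) : (pvE n i).length = n.toNat := by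
  simp [pvE, PySem.List.length_pyRange_one]

theorem pvE_getElem (n i : Int) (k : Nat) (hk : k < (pvE n i).length) :
    (pvE n i)[k] = if i = (k : Int) then (1:Int) else 0 := by
  simp only [pvE, List.getElem_map, PySem.List.getElem_pyRange_one, zero_add]

theorem pvE_get_left (n a b r : Int) (h0 : 0 ≤ r) (hr : r < n) :
    PySem.List.pyGetD (pvE n a ++ pvE n b) r 0 = if a = r then (1:Int) else 0 := by
  have hlen : r < ((pvE n a ++ pvE n b).length : Int) := by
    simp [List.length_append, length_pvE]; omega
  rw [PySem.List.pyGetD_eq_getElem _ 0 h0 hlen]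
  have hra : r.toNat < (pvE n a).length := by rw [length_pvE]; omega
  rw [List.getElem_append_left hra, pvE_getElem n a r.toNat hra]
  congr 1
  simp only [eq_iff_iff]
  omega

theorem pvE_get_right (n a b r : Int) (h0 : n ≤ r) (hr : r < 2 * n) :
    PySem.List.pyGetD (pvE n a ++ pvE n b) r 0 = if b = r - n then (1:Int) else 0 := by
  have hn : 0 < n := by omega
  have hlen : r < ((pvE n a ++ pvE n b).length : Int) := by
    simp [List.length_append, length_pvE]; omega
  rw [PySem.List.pyGetD_eq_getElem _ 0 (by omega : (0:Int) ≤ r) hlen]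
  rw [List.getElem_append_right (by rw [length_pvE]; omega : (pvE n a).length ≤ r.toNat)]
  have hidx : r.toNat - (pvE n a).length = (r - n).toNat := by rw [length_pvE]; omega
  have hb : (r - n).toNat < (pvE n b).length := by rw [length_pvE]; omega
  simp only [hidx]
  rw [pvE_getElem n b _ hb]
  congr 1
  simp only [eq_iff_iff]
  omega

-- B equals the closed-form block matrix
theorem b_eq_blocks (n : Int) : thematrix_alt n = pvMtop n ++ pvMbot n := by
  by_cases hn : n ≤ 0
  · simp [thematrix_alt, pvMtop, pvMbot, PySem.List.pyRange_one_eq_nil hn,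
          PySem.List.pyRange_one_eq_nil (by omega : 2 * n ≤ 0)]
  · push_neg at hn
    have hnt : ((n.toNat : Nat) : Int) = n := Int.toNat_of_nonneg hn.le
    unfold thematrix_alt
    show (PySem.List.pyRange 0 (2 * n) 1).map (fun r =>
        ((PySem.List.pyRange 0 n 1).flatMap (fun j =>
          (PySem.List.pyRange 0 n 1).map (fun i =>
            PySem.List.pyGetD ((PySem.List.pyRange 0 n 1).map (fun a =>
              (PySem.List.pyRange 0 n 1).map (fun b => if a = b then (1 : Int) else 0))) i []
            ++ PySem.List.pyGetD ((PySem.List.pyRange 0 n 1).map (fun a =>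
              (PySem.List.pyRange 0 n 1).map (fun b => if a = b then (1 : Int) else 0))) j []))).map
          (fun col => PySem.List.pyGetD col r (0 : Int)))
      = pvMtop n ++ pvMbot n
    -- rewrite cols into the closed product form
    have hI : ∀ x : Int, 0 ≤ x → x < n →
        PySem.List.pyGetD ((PySem.List.pyRange 0 n 1).map (fun a =>
          (PySem.List.pyRange 0 n 1).map (fun b => if a = b then (1:Int) else 0))) x [] = pvE n x := by
      intro x hx0 hxn
      rw [PySem.List.pyGetD_map_pyRange_of_nonneg _ _ _ _ hx0 hxn]
      rfl
    have hcols : (PySem.List.pyRange 0 n 1).flatMap (fun j =>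
        (PySem.List.pyRange 0 n 1).map (fun i =>
          PySem.List.pyGetD ((PySem.List.pyRange 0 n 1).map (fun a =>
            (PySem.List.pyRange 0 n 1).map (fun b => if a = b then (1:Int) else 0))) i []
          ++ PySem.List.pyGetD ((PySem.List.pyRange 0 n 1).map (fun a =>
            (PySem.List.pyRange 0 n 1).map (fun b => if a = b then (1:Int) else 0))) j []))
        = (PySem.List.pyRange 0 (n * n) 1).map (fun c => pvE n (c % n) ++ pvE n (c / n)) := by
      have step1 : ∀ j ∈ PySem.List.pyRange 0 n 1,
          (PySem.List.pyRange 0 n 1).map (fun i =>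
            PySem.List.pyGetD ((PySem.List.pyRange 0 n 1).map (fun a =>
              (PySem.List.pyRange 0 n 1).map (fun b => if a = b then (1:Int) else 0))) i []
            ++ PySem.List.pyGetD ((PySem.List.pyRange 0 n 1).map (fun a =>
              (PySem.List.pyRange 0 n 1).map (fun b => if a = b then (1:Int) else 0))) j [])
          = (PySem.List.pyRange 0 n 1).map (fun i => pvE n i ++ pvE n j) := by
        intro j hj
        rw [PySem.List.mem_pyRange_one] at hj
        apply List.map_congr_left
        intro i hi
        rw [PySem.List.mem_pyRange_one] at hi
        rw [hI i hi.1 hi.2, hI j hj.1 hj.2]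
      rw [flatMap_congr_mem step1]
      have := flatMap_prod_range n hn.le (fun j i => pvE n i ++ pvE n j) n.toNat
      rw [hnt] at this
      rw [this]
    rw [hcols]
    -- transpose of the product columns, split into the two row blocks
    rw [PySem.List.pyRange_one_append 0 n (2 * n) hn.le (by omega), List.map_append]
    unfold pvMtop pvMbot
    congr 1
    · apply List.map_congr_left
      intro r hr
      rw [PySem.List.mem_pyRange_one] at hr
      rw [List.map_map]
      apply List.map_congr_left
      intro c hc
      rw [PySem.List.mem_pyRange_one] at hc
      simp only [Function.comp_apply]
      rw [pvE_get_left n (c % n) (c / n) r hr.1 hr.2]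
    · apply List.ext_getElem
      · simp [PySem.List.length_pyRange_one]; omega
      · intro k hk1 hk2
        simp only [List.getElem_map, PySem.List.getElem_pyRange_one, zero_add, List.map_map]
        have hkn : (k : Int) < n := by
          simp [PySem.List.length_pyRange_one] at hk2; omega
        apply List.map_congr_left
        intro c hc
        rw [PySem.List.mem_pyRange_one] at hc
        simp only [Function.comp_apply]
        rw [pvE_get_right n (c % n) (c / n) (n + (k:Int)) (by omega) (by omega)]
        congr 1
        simp only [eq_iff_iff]
        constructor <;> (intro h; omega)

-- ===== VERDICT (by name: the statement is the Claim_ definition above) =====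
theorem thematrix_spec : Claim_equal_thematrix := by
  intro n _
  unfold Spec_thematrix
  rw [a_eq_blocks, b_eq_blocks]
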